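-- pv_equiv track=rewrite | github.com/nanoex6237-beep/Logos_ex_Machina | app/create_db.py | label_for_counters
-- ===== SOURCE A (Python) =====
-- def to_roman(num: int) -> str:
--     vals = [
--         (1000, "M"),
--         (900, "CM"),
--         (500, "D"),
--         (400, "CD"),
--         (100, "C"),
--         (90, "XC"),
--         (50, "L"),
--         (40, "XL"),
--         (10, "X"),
--         (9, "IX"),
--         (5, "V"),
--         (4, "IV"),
--         (1, "I"),
--     ]
--     out = []
--     for v, sym in vals:
--         while num >= v:
--             out.append(sym)
--             num -= v
--     return "".join(out) if out else "I"
--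
-- def label_for_counters(counters: list[int]) -> str:
--     parts = []
--     for idx, val in enumerate(counters):
--         if idx == 0:
--             parts.append(to_roman(val))
--         elif idx == 1:
--             parts.append(chr(ord("A") + val - 1))
--         elif idx == 2:
--             parts.append(chr(ord("a") + val - 1))
--         else:
--             parts.append(str(val))
--     return ".".join(parts)
-- ===== SOURCE B (Python) =====
-- def to_roman(num: int) -> str:
--     if num < 1:
--         return "I"
--     ones = ["", "I", "II", "III", "IV", "V", "VI", "VII", "VIII", "IX"]
--     tens = ["", "X", "XX", "XXX", "XL", "L", "LX", "LXX", "LXXX", "XC"]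
--     hundreds = ["", "C", "CC", "CCC", "CD", "D", "DC", "DCC", "DCCC", "CM"]
--     return ("M" * (num // 1000)
--             + hundreds[num // 100 % 10]
--             + tens[num // 10 % 10]
--             + ones[num % 10])
--
-- def label_for_counters(counters: list[int]) -> str:
--     return ".".join(
--         to_roman(v) if i == 0 else
--         chr(64 + v) if i == 1 else
--         chr(96 + v) if i == 2 else
--         str(v)
--         for i, v in enumerate(counters)
--     )
-- ===== Notes on version B (the rewrite author's own statement) =====
-- stated objective: alternative
-- what changed: to_roman is reimplemented with decimal place-value lookup tables (ones/tens/hundreds indexed by digits plus 'M'*(num//1000)) instead of A's greedy repeated-subtraction over the 13-entry value list, and the label is built as a single join over a generator instead of an accumulated parts list.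
import Mathlib
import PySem

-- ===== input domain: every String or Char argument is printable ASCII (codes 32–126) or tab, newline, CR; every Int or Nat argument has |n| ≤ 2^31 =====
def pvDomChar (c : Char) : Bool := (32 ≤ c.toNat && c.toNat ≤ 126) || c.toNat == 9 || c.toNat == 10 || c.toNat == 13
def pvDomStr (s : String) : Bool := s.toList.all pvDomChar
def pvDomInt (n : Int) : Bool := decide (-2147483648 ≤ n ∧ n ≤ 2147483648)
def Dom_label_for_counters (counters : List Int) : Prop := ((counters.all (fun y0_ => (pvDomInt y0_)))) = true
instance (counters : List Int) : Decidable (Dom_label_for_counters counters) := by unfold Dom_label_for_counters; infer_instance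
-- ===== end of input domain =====

-- B replaces A's greedy-subtraction Roman-numeral loop by decimal place-value lookup tables (alternative decomposition, same result).

-- ===== PORT A =====
-- 'while num >= v: out.append(sym); num -= v' — fueled structural loop; fuel num.toNat+1 suffices since every v in romanVals is ≥ 1
def romanWhileF : Nat → Int → String → Int → List String → Int × List String
  | 0, _, _, num, out => (num, out)
  | fuel+1, v, sym, num, out =>
    if v ≤ num then romanWhileF fuel v sym (num - v) (out ++ [sym]) else (num, out)

def romanWhile (v : Int) (sym : String) (num : Int) (out : List String) : Int × List String :=
  romanWhileF (num.toNat + 1) v sym num out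

def restVals : List (Int × String) :=
  [(900, "CM"), (500, "D"), (400, "CD"), (100, "C"), (90, "XC"), (50, "L"),
   (40, "XL"), (10, "X"), (9, "IX"), (5, "V"), (4, "IV"), (1, "I")]

def romanVals : List (Int × String) := (1000, "M") :: restVals

def to_roman (num : Int) : String :=
  let p := romanVals.foldl (fun s vs => romanWhile vs.1 vs.2 s.1 s.2) (num, ([] : List String))
  if p.2.isEmpty then "I" else PySem.Str.join "" p.2

def label_for_counters (counters : List Int) : String :=
  let parts := (PySem.List.enumerate counters).foldl (fun parts iv =>
      if iv.1 = 0 then parts ++ [to_roman iv.2]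
      else if iv.1 = 1 then parts ++ [String.ofList [Char.ofNat (65 + iv.2 - 1).toNat]]  -- chr(ord("A")+val-1); exact under Pre_
      else if iv.1 = 2 then parts ++ [String.ofList [Char.ofNat (97 + iv.2 - 1).toNat]]  -- chr(ord("a")+val-1); exact under Pre_
      else parts ++ [PySem.Int.toStr iv.2]) []
  PySem.Str.join "." parts

-- ===== PORT B =====
def onesT : List (List Char) :=
  [[], ['I'], ['I','I'], ['I','I','I'], ['I','V'], ['V'], ['V','I'], ['V','I','I'], ['V','I','I','I'], ['I','X']]
def tensT : List (List Char) :=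
  [[], ['X'], ['X','X'], ['X','X','X'], ['X','L'], ['L'], ['L','X'], ['L','X','X'], ['L','X','X','X'], ['X','C']]
def hundredsT : List (List Char) :=
  [[], ['C'], ['C','C'], ['C','C','C'], ['C','D'], ['D'], ['D','C'], ['D','C','C'], ['D','C','C','C'], ['C','M']]

def to_roman_alt (num : Int) : String :=
  if num < 1 then "I"
  else String.ofList (PySem.List.pyRepeat ['M'] (PySem.Int.floordiv num 1000)
    ++ hundredsT.getD (PySem.Int.mod (PySem.Int.floordiv num 100) 10).toNat []
    ++ tensT.getD (PySem.Int.mod (PySem.Int.floordiv num 10) 10).toNat []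
    ++ onesT.getD (PySem.Int.mod num 10).toNat [])

def label_for_counters_alt (counters : List Int) : String :=
  PySem.Str.join "." ((PySem.List.enumerate counters).map (fun iv =>
    if iv.1 = 0 then to_roman_alt iv.2
    else if iv.1 = 1 then String.ofList [Char.ofNat (64 + iv.2).toNat]
    else if iv.1 = 2 then String.ofList [Char.ofNat (96 + iv.2).toNat]
    else PySem.Int.toStr iv.2))

-- ===== PRECONDITION & SPEC =====
def chrOK (cp : Int) : Bool := 0 ≤ cp && cp < 1114112 && !(55296 ≤ cp && cp < 57344)

-- Pre_ excludes lists whose 2nd/3rd entry gives chr() an out-of-range codepoint (both A and B raise ValueError there)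
-- or a UTF-16 surrogate codepoint (both A and B return the same lone-surrogate string, which is not representable as a Lean String).
def Pre_label_for_counters (counters : List Int) : Prop :=
  counters[1]?.all (fun v => chrOK (64 + v)) = true ∧ counters[2]?.all (fun v => chrOK (96 + v)) = true
instance (counters : List Int) : Decidable (Pre_label_for_counters counters) := by
  unfold Pre_label_for_counters; infer_instance

def pvWitness_label_for_counters : List Int := [3, 2, 1, 7]

def Spec_label_for_counters (counters : List Int) (out : String) : Prop := out = label_for_counters_alt counters
instance (counters : List Int) (out : String) : Decidable (Spec_label_for_counters counters out) := by unfold Spec_label_for_counters; infer_instance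

-- ===== CLAIM (what is proved, stated in full; the proofs are below) =====
def Claim_equal_label_for_counters : Prop := ∀ (counters : List Int), Dom_label_for_counters counters → Pre_label_for_counters counters → Spec_label_for_counters counters (label_for_counters counters)

-- ===== LEMMAS AND PROOFS =====

theorem romanWhileF_skip (f : Nat) (v : Int) (sym : String) (num : Int) (out : List String)
    (h : ¬ v ≤ num) : romanWhileF f v sym num out = (num, out) := by
  cases f <;> simp [romanWhileF, h]

theorem romanWhileF_acc (f : Nat) (v : Int) (sym : String) (num : Int) (out : List String) :
    romanWhileF f v sym num out
      = ((romanWhileF f v sym num []).1, out ++ (romanWhileF f v sym num []).2) := by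
  induction f generalizing num out with
  | zero => simp [romanWhileF]
  | succ f ih =>
    by_cases h : v ≤ num
    · simp only [romanWhileF, if_pos h]
      rw [ih (num - v) (out ++ [sym]), ih (num - v) ([] ++ [sym])]
      simp
    · rw [romanWhileF_skip _ _ _ _ _ h, romanWhileF_skip _ _ _ _ _ h]
      simp

theorem romanWhile_acc (v : Int) (sym : String) (num : Int) (out : List String) :
    romanWhile v sym num out
      = ((romanWhile v sym num []).1, out ++ (romanWhile v sym num []).2) :=
  romanWhileF_acc _ _ _ _ _

theorem romanWhileF_fuel (v : Int) (sym : String) (hv : 1 ≤ v) :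
    ∀ (f1 f2 : Nat) (num : Int) (out : List String), num.toNat ≤ f1 → num.toNat ≤ f2 →
      romanWhileF f1 v sym num out = romanWhileF f2 v sym num out := by
  intro f1
  induction f1 with
  | zero =>
    intro f2 num out h1 _
    have h : ¬ v ≤ num := by omega
    rw [romanWhileF_skip _ _ _ _ _ h, romanWhileF_skip _ _ _ _ _ h]
  | succ f1 ih =>
    intro f2 num out h1 h2
    by_cases h : v ≤ num
    · cases f2 with
      | zero => omega
      | succ f2 =>
        simp only [romanWhileF, if_pos h]
        exact ih f2 (num - v) (out ++ [sym]) (by omega) (by omega)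
    · rw [romanWhileF_skip _ _ _ _ _ h, romanWhileF_skip _ _ _ _ _ h]

theorem mwhileAux (n : Nat) : ∀ (num : Int), 0 ≤ num → num.toNat ≤ n →
    romanWhile 1000 "M" num [] = (num % 1000, List.replicate (num / 1000).toNat "M") := by
  induction n with
  | zero =>
    intro num h0 hn
    have hnum : num = 0 := by omega
    subst hnum
    rw [romanWhile, romanWhileF_skip _ _ _ _ _ (by omega)]
    simp
  | succ n ih =>
    intro num h0 hn
    by_cases h : (1000 : Int) ≤ num
    · have hq : (num / 1000).toNat = ((num - 1000) / 1000).toNat + 1 := by omega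
      have hr : num % 1000 = (num - 1000) % 1000 := by omega
      rw [romanWhile]
      have : num.toNat + 1 = (num.toNat) + 1 := rfl
      simp only [romanWhileF, if_pos h]
      rw [romanWhileF_acc, romanWhileF_fuel 1000 "M" (by omega) num.toNat ((num - 1000).toNat + 1) (num - 1000) [] (by omega) (by omega)]
      rw [show romanWhileF ((num - 1000).toNat + 1) 1000 "M" (num - 1000) [] = romanWhile 1000 "M" (num - 1000) [] from rfl]
      rw [ih (num - 1000) (by omega) (by omega)]
      rw [hq, hr, List.replicate_succ]
      simp
    · rw [romanWhile, romanWhileF_skip _ _ _ _ _ h]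
      have h1 : num % 1000 = num := by omega
      have h2 : (num / 1000).toNat = 0 := by omega
      rw [h1, h2]
      simp

theorem mwhile (num : Int) (h0 : 0 ≤ num) :
    romanWhile 1000 "M" num [] = (num % 1000, List.replicate (num / 1000).toNat "M") :=
  mwhileAux num.toNat num h0 le_rfl

theorem fold_acc (l : List (Int × String)) : ∀ (num : Int) (out : List String),
    l.foldl (fun s vs => romanWhile vs.1 vs.2 s.1 s.2) (num, out)
      = ((l.foldl (fun s vs => romanWhile vs.1 vs.2 s.1 s.2) (num, [])).1,
         out ++ (l.foldl (fun s vs => romanWhile vs.1 vs.2 s.1 s.2) (num, [])).2) := by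
  induction l with
  | nil => intro num out; simp
  | cons p t ih =>
    intro num out
    simp only [List.foldl]
    rw [romanWhile_acc p.1 p.2 num out]
    conv_rhs => rw [← Prod.mk.eta (p := romanWhile p.1 p.2 num [])]
    rw [ih (romanWhile p.1 p.2 num []).1 (out ++ (romanWhile p.1 p.2 num []).2),
        ih (romanWhile p.1 p.2 num []).1 (romanWhile p.1 p.2 num []).2]
    simp

def tailRes (r : Int) : Int × List String :=
  restVals.foldl (fun s vs => romanWhile vs.1 vs.2 s.1 s.2) (r, [])

set_option maxRecDepth 40000 in
theorem tail_table : ∀ r : Fin 1000,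
    (PySem.Str.join "" (tailRes (r : Int)).2
       = String.ofList (hundredsT.getD ((r : Nat) / 100) [] ++ tensT.getD ((r : Nat) / 10 % 10) []
                    ++ onesT.getD ((r : Nat) % 10) [])
     ∧ (0 < (r : Nat) → (tailRes (r : Int)).2 ≠ [])) := by
  decide

theorem join_nil_flatten (css : List (List Char)) :
    PySem.Chars.join [] css = css.flatten := by
  simp only [PySem.Chars.join, List.intercalate]
  induction css with
  | nil => simp
  | cons c t ih => cases t <;> simp_all [List.intersperse]

theorem flatten_replicate_singleton (q : Nat) (a : Char) :
    (List.replicate q [a]).flatten = List.replicate q a := by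
  induction q with
  | zero => rfl
  | succ q ih => simp [List.replicate_succ, ih]

theorem join_empty_replicate (q : Nat) (rest : List String) :
    PySem.Str.join "" (List.replicate q "M" ++ rest)
      = String.ofList (List.replicate q 'M' ++ (PySem.Str.join "" rest).toList) := by
  simp only [PySem.Str.join]
  congr 1
  have h1 : ("" : String).toList = [] := rfl
  have h2 : ("M" : String).toList = ['M'] := rfl
  simp only [h1, List.map_append, join_nil_flatten, List.flatten_append, List.map_replicate, h2,
    String.toList_ofList, flatten_replicate_singleton]

theorem to_roman_eq (num : Int) : to_roman num = to_roman_alt num := by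
  by_cases h : num < 1
  · have hw : ∀ (v : Int) (sym : String), 1 ≤ v → romanWhile v sym num [] = (num, []) := by
      intro v sym hv
      rw [romanWhile, romanWhileF_skip _ _ _ _ _ (by omega)]
    simp only [to_roman, romanVals, restVals, List.foldl]
    rw [hw 1000 "M" (by norm_num)]
    simp only
    rw [hw 900 "CM" (by norm_num)]; simp only
    rw [hw 500 "D" (by norm_num)]; simp only
    rw [hw 400 "CD" (by norm_num)]; simp only
    rw [hw 100 "C" (by norm_num)]; simp only
    rw [hw 90 "XC" (by norm_num)]; simp only
    rw [hw 50 "L" (by norm_num)]; simp only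
    rw [hw 40 "XL" (by norm_num)]; simp only
    rw [hw 10 "X" (by norm_num)]; simp only
    rw [hw 9 "IX" (by norm_num)]; simp only
    rw [hw 5 "V" (by norm_num)]; simp only
    rw [hw 4 "IV" (by norm_num)]; simp only
    rw [hw 1 "I" (by norm_num)]
    simp [to_roman_alt, if_pos h]
  · push_neg at h
    have h0 : (0 : Int) ≤ num := by omega
    have hrlt : num % 1000 < 1000 := by omega
    have hr0 : 0 ≤ num % 1000 := by omega
    let rf : Fin 1000 := ⟨(num % 1000).toNat, by omega⟩
    have hrf : (rf : Int) = num % 1000 := by simp [rf]; omega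
    simp only [to_roman, romanVals]
    rw [List.foldl_cons]
    simp only
    rw [mwhile num h0]
    rw [show (List.foldl (fun s vs => romanWhile vs.1 vs.2 s.1 s.2)
          ((num % 1000, List.replicate (num / 1000).toNat "M") : Int × List String) restVals)
        = restVals.foldl (fun s vs => romanWhile vs.1 vs.2 s.1 s.2)
            (num % 1000, List.replicate (num / 1000).toNat "M") from rfl]
    rw [fold_acc restVals (num % 1000) (List.replicate (num / 1000).toNat "M")]
    have htt := tail_table rf
    rw [hrf] at htt
    have hne : ¬ (List.replicate (num / 1000).toNat "M" ++ (tailRes (num % 1000)).2).isEmpty = true := by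
      by_cases hq : 0 < (num / 1000).toNat
      · simp [List.isEmpty_iff, List.append_eq_nil_iff]
        omega
      · have hrpos : 0 < (rf : Nat) := by simp [rf]; omega
        have := htt.2 hrpos
        simp [List.isEmpty_iff, List.append_eq_nil_iff, this]
    rw [show (restVals.foldl (fun s vs => romanWhile vs.1 vs.2 s.1 s.2) ((num % 1000 : Int), ([] : List String))) = tailRes (num % 1000) from rfl]
    simp only [if_neg hne]
    rw [join_empty_replicate, htt.1]
    -- right-hand side
    rw [to_roman_alt, if_neg (by omega)]
    rw [PySem.List.pyRepeat_singleton]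
    rw [PySem.Int.floordiv_eq_ediv_of_pos (by norm_num : (0:Int) < 1000)]
    rw [PySem.Int.floordiv_eq_ediv_of_pos (by norm_num : (0:Int) < 100)]
    rw [PySem.Int.floordiv_eq_ediv_of_pos (by norm_num : (0:Int) < 10)]
    rw [PySem.Int.mod_eq_emod_of_pos (by norm_num : (0:Int) < 10)]
    rw [PySem.Int.mod_eq_emod_of_pos (by norm_num : (0:Int) < 10)]
    rw [PySem.Int.mod_eq_emod_of_pos (by norm_num : (0:Int) < 10)]
    have e1 : (num / 100 % 10).toNat = (rf : Nat) / 100 := by simp [rf]; omega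
    have e2 : (num / 10 % 10).toNat = (rf : Nat) / 10 % 10 := by simp [rf]; omega
    have e3 : (num % 10).toNat = (rf : Nat) % 10 := by simp [rf]; omega
    rw [e1, e2, e3]
    simp [List.append_assoc]

theorem label_for_counters_spec : Claim_equal_label_for_counters := by
  intro counters _ hpre
  unfold Spec_label_for_counters
  unfold label_for_counters label_for_counters_alt
  simp only
  rw [show (fun (parts : List String) (iv : Int × Int) =>
        if iv.1 = 0 then parts ++ [to_roman iv.2]
        else if iv.1 = 1 then parts ++ [String.ofList [Char.ofNat (65 + iv.2 - 1).toNat]]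
        else if iv.1 = 2 then parts ++ [String.ofList [Char.ofNat (97 + iv.2 - 1).toNat]]
        else parts ++ [PySem.Int.toStr iv.2])
      = (fun (parts : List String) (iv : Int × Int) => parts ++
          [if iv.1 = 0 then to_roman iv.2
           else if iv.1 = 1 then String.ofList [Char.ofNat (65 + iv.2 - 1).toNat]
           else if iv.1 = 2 then String.ofList [Char.ofNat (97 + iv.2 - 1).toNat]
           else PySem.Int.toStr iv.2]) from by funext parts iv; split_ifs <;> rfl]
  rw [PySem.List.foldl_append_singleton_eq_map]
  rw [List.nil_append]
  congr 1
  apply List.map_congr_left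
  intro iv _
  have e1 : 65 + iv.2 - 1 = 64 + iv.2 := by omega
  have e2 : 97 + iv.2 - 1 = 96 + iv.2 := by omega
  rw [e1, e2, to_roman_eq]
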